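-- pv_equiv track=rewrite | github.com/humancipher/Programming_Contest | Programming_Contest/AtCoder/ABC/ABC_001-099/ABC_050-059/ABC_053/ABC_053_D.py | solve
-- ===== SOURCE A (Python) =====
-- def solve(A,N):
--     C = dict() #C[a]:カードaの枚数
--     T = [] #T[i]:i番目に小さいカードの数値
--     for a in A:
--         if a in C:
--             C[a] += 1
--         else:
--             C[a] = 1
--             T.append(a)
--     T.sort()
--     left,right = 0,len(T)-1
--     ans = N
--     while True:
--         if C[T[left]] <= 1:
--             while C[T[left]] <= 1 and left < right:
--                 left += 1
--         if C[T[right]] <= 1: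
--             while C[T[right]] <= 1 and left < right:
--                 right -= 1
--         if left < right:
--             C[T[left]] -= 1
--             C[T[right]] -= 1
--             ans -= 2
--         else:
--             if C[T[left]] % 2 == 0:
--                 ans -= C[T[left]]
--             else:
--                 ans -= (C[T[left]] - 1)
--             break
--     return ans
-- ===== SOURCE B (Python) =====
-- def solve(A, N):
--     K = len(set(A))
--     extra = len(A) - K
--     return N - extra - extra % 2
-- ===== Notes on version B (the rewrite author's own statement) =====
-- stated objective: faster
-- what changed: Replaces the dict + sorted list + two-pointer pair-removal simulation by the closed form N - extra - extra%2 with extra = len(A) - len(set(A)), since each removal step eliminates two surplus duplicates.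
-- outside the precondition, e.g. on solve([], 0): A raises IndexError, B returns 0
import Mathlib
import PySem

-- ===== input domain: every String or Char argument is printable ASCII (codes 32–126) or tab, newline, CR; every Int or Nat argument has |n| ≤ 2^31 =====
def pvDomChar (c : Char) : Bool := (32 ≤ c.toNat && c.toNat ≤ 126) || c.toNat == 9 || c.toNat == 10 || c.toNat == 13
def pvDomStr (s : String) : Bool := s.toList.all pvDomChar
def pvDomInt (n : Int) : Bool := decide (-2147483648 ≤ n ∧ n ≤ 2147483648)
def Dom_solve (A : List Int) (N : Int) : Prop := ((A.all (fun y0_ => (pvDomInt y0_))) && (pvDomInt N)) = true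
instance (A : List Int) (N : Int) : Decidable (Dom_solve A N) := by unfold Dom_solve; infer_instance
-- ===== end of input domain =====

-- B replaces A's dict + sorted distinct list + two-pointer pair-removal simulation by the closed
-- form N - extra - extra % 2 with extra = len(A) - len(set(A)) (objective: faster).

-- ===== PORT A =====

-- for a in A: if a in C: C[a] += 1 else: C[a] = 1; T.append(a)
def pvBuildCT (A : List Int) : PySem.Dict Int Int × List Int :=
  A.foldl (fun p a =>
    if p.1.contains a then (p.1.modify a 0 (· + 1), p.2)
    else (p.1.insert a 1, p.2 ++ [a])) (PySem.Dict.empty, [])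

-- inner 'while C[T[left]] <= 1 and left < right: left += 1'
def pvSkipL (C : PySem.Dict Int Int) (T : List Int) (right : Nat) (left : Nat) : Nat :=
  if C.getD (T.getD left 0) 0 ≤ 1 ∧ left < right then pvSkipL C T right (left + 1) else left
termination_by right - left
decreasing_by omega

-- inner 'while C[T[right]] <= 1 and left < right: right -= 1'
def pvSkipR (C : PySem.Dict Int Int) (T : List Int) (left : Nat) (right : Nat) : Nat :=
  if C.getD (T.getD right 0) 0 ≤ 1 ∧ left < right then pvSkipR C T left (right - 1) else right
termination_by right
decreasing_by omega

-- the 'while True' loop; fuel only makes the recursion structural, it is never exhausted under Pre_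
def pvLoopA : Nat → PySem.Dict Int Int → List Int → Nat → Nat → Int → Int
  | 0, _, _, _, _, ans => ans
  | fuel + 1, C, T, left, right, ans =>
    let left' := if C.getD (T.getD left 0) 0 ≤ 1 then pvSkipL C T right left else left
    let right' := if C.getD (T.getD right 0) 0 ≤ 1 then pvSkipR C T left' right else right
    if left' < right' then
      let C' := (C.modify (T.getD left' 0) 0 (· - 1)).modify (T.getD right' 0) 0 (· - 1)
      pvLoopA fuel C' T left' right' (ans - 2)
    else
      if PySem.Int.mod (C.getD (T.getD left' 0) 0) 2 == 0 then
        ans - C.getD (T.getD left' 0) 0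
      else
        ans - (C.getD (T.getD left' 0) 0 - 1)

def solve (A : List Int) (N : Int) : Int :=
  let CT := pvBuildCT A
  let T := PySem.List.sorted CT.2 (fun x => x) false
  pvLoopA (A.length + 1) CT.1 T 0 (T.length - 1) N

-- ===== PORT B =====
def solve_alt (A : List Int) (N : Int) : Int :=
  let K : Int := (PySem.Set.ofList A).length
  let extra : Int := (A.length : Int) - K
  N - extra - PySem.Int.mod extra 2

-- ===== PRECONDITION & SPEC =====
-- Pre_ excludes only the empty list, on which A raises IndexError (T[0] with T empty).
def Pre_solve (A : List Int) (N : Int) : Prop := A ≠ []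
instance (A : List Int) (N : Int) : Decidable (Pre_solve A N) := by unfold Pre_solve; infer_instance
def pvWitness_solve : List Int × Int := ([3, 1, 3, 2], 4)

def Spec_solve (A : List Int) (N : Int) (out : Int) : Prop := out = solve_alt A N
instance (A : List Int) (N : Int) (out : Int) : Decidable (Spec_solve A N out) := by unfold Spec_solve; infer_instance

-- ===== CLAIM (what is proved, stated in full; the proofs are below) =====
def Claim_equal_solve : Prop := ∀ (A : List Int) (N : Int), Dom_solve A N → Pre_solve A N → Spec_solve A N (solve A N)

-- ===== LEMMAS AND PROOFS =====

-- window sum of counts over indices left..right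
def pvWinSum (C : PySem.Dict Int Int) (T : List Int) (left right : Nat) : Int :=
  ((List.range' left (right + 1 - left)).map (fun i => C.getD (T.getD i 0) 0)).sum

theorem pv_getD_inj {T : List Int} (hnd : T.Nodup) {i j : Nat}
    (hi : i < T.length) (hj : j < T.length) : T.getD i 0 = T.getD j 0 ↔ i = j := by
  rw [List.getD_eq_getElem T 0 hi, List.getD_eq_getElem T 0 hj]
  exact hnd.getElem_inj_iff

theorem pvBuild_aux (A : List Int) : ∀ (d : PySem.Dict Int Int) (t : PySem.Set Int),
    (∀ a : Int, d.contains a = true ↔ a ∈ t) →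
    A.foldl (fun p a =>
        if p.1.contains a then (p.1.modify a 0 (· + 1), p.2)
        else (p.1.insert a 1, p.2 ++ [a])) (d, t)
      = (A.foldl (fun d x => d.modify x 0 (· + 1)) d, A.foldl PySem.Set.add t) := by
  induction A with
  | nil => intro d t _; rfl
  | cons a A ih =>
    intro d t h
    simp only [List.foldl_cons]
    have hstep : (if d.contains a then (d.modify a 0 (· + 1), t) else (d.insert a 1, t ++ [a]))
        = (d.modify a 0 (· + 1), PySem.Set.add t a) := by
      by_cases hc : d.contains a = true
      · have hmem : a ∈ t := (h a).mp hc
        simp [hc, PySem.Set.add]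
        exact hmem
      · have hc' : d.contains a = false := by
          cases hcc : d.contains a
          · rfl
          · exact absurd hcc hc
        have hmem : a ∉ t := fun hm => hc ((h a).mpr hm)
        have hg : d.getD a 0 = 0 := PySem.Dict.getD_of_not_contains d 0 hc'
        simp [hc', PySem.Set.add, PySem.Dict.modify, hg]
        exact hmem
    rw [hstep]
    exact ih _ _ (by
      intro x
      rw [PySem.Dict.contains_modify, PySem.Set.mem_add]
      simp only [Bool.or_eq_true, beq_iff_eq]
      rw [h x]
      tauto)

theorem pvBuildCT_eq (A : List Int) :
    pvBuildCT A = (PySem.Dict.counter A, PySem.Set.ofList A) := by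
  rw [pvBuildCT, PySem.Dict.counter_eq_foldl, PySem.Set.ofList_eq_foldl]
  exact pvBuild_aux A PySem.Dict.empty [] (by simp [PySem.Dict.contains_empty])

theorem pvSkipL_spec (C : PySem.Dict Int Int) (T : List Int) (right : Nat) :
    ∀ (n left : Nat), right - left = n → left ≤ right →
      left ≤ pvSkipL C T right left ∧ pvSkipL C T right left ≤ right ∧
      (∀ i, left ≤ i → i < pvSkipL C T right left → C.getD (T.getD i 0) 0 ≤ 1) ∧
      (pvSkipL C T right left < right → 1 < C.getD (T.getD (pvSkipL C T right left) 0) 0) := by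
  intro n
  induction n using Nat.strong_induction_on with
  | _ n ih =>
    intro left hn hlr
    rw [pvSkipL]
    by_cases h : C.getD (T.getD left 0) 0 ≤ 1 ∧ left < right
    · rw [if_pos h]
      obtain ⟨ih1, ih2, ih3, ih4⟩ :=
        ih (right - (left + 1)) (by omega) (left + 1) rfl (by omega)
      refine ⟨by omega, ih2, ?_, ih4⟩
      intro i hi1 hi2
      rcases Nat.eq_or_lt_of_le hi1 with hEq | hLt
      · rw [← hEq]; exact h.1
      · exact ih3 i hLt hi2
    · rw [if_neg h]
      refine ⟨le_refl _, hlr, by omega, ?_⟩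
      intro hlt
      by_contra hle
      exact h ⟨by omega, hlt⟩

theorem pvSkipR_spec (C : PySem.Dict Int Int) (T : List Int) (left : Nat) :
    ∀ (right : Nat), left ≤ right →
      left ≤ pvSkipR C T left right ∧ pvSkipR C T left right ≤ right ∧
      (∀ i, pvSkipR C T left right < i → i ≤ right → C.getD (T.getD i 0) 0 ≤ 1) ∧
      (left < pvSkipR C T left right → 1 < C.getD (T.getD (pvSkipR C T left right) 0) 0) := by
  intro right
  induction right using Nat.strong_induction_on with
  | _ right ih =>
    intro hlr
    rw [pvSkipR]
    by_cases h : C.getD (T.getD right 0) 0 ≤ 1 ∧ left < right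
    · rw [if_pos h]
      obtain ⟨ih1, ih2, ih3, ih4⟩ := ih (right - 1) (by omega) (by omega)
      refine ⟨ih1, by omega, ?_, ih4⟩
      intro i hi1 hi2
      rcases Nat.eq_or_lt_of_le hi2 with hEq | hLt
      · rw [hEq]; exact h.1
      · exact ih3 i hi1 (by omega)
    · rw [if_neg h]
      refine ⟨hlr, le_refl _, by omega, ?_⟩
      intro hlt
      by_contra hle
      exact h ⟨by omega, hlt⟩

theorem pvSkipL_collapse (C : PySem.Dict Int Int) (T : List Int) (right left : Nat) :
    (if C.getD (T.getD left 0) 0 ≤ 1 then pvSkipL C T right left else left)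
      = pvSkipL C T right left := by
  by_cases h : C.getD (T.getD left 0) 0 ≤ 1
  · rw [if_pos h]
  · rw [if_neg h]
    conv_rhs => rw [pvSkipL]
    rw [if_neg (fun hc => h hc.1)]

theorem pvSkipR_collapse (C : PySem.Dict Int Int) (T : List Int) (left right : Nat) :
    (if C.getD (T.getD right 0) 0 ≤ 1 then pvSkipR C T left right else right)
      = pvSkipR C T left right := by
  by_cases h : C.getD (T.getD right 0) 0 ≤ 1
  · rw [if_pos h]
  · rw [if_neg h]
    conv_rhs => rw [pvSkipR]
    rw [if_neg (fun hc => h hc.1)]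

theorem pvWinSum_cons (C : PySem.Dict Int Int) (T : List Int) {l r : Nat} (h : l ≤ r) :
    pvWinSum C T l r = C.getD (T.getD l 0) 0 + pvWinSum C T (l + 1) r := by
  unfold pvWinSum
  rw [show r + 1 - l = (r - l) + 1 from by omega, List.range'_succ,
    show r + 1 - (l + 1) = r - l from by omega]
  simp

theorem pvWinSum_concat (C : PySem.Dict Int Int) (T : List Int) {l r : Nat}
    (h : l ≤ r) (hr : 1 ≤ r) :
    pvWinSum C T l r = pvWinSum C T l (r - 1) + C.getD (T.getD r 0) 0 := by
  unfold pvWinSum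
  rw [show r + 1 - l = (r - l) + 1 from by omega, List.range'_concat,
    show r - 1 + 1 - l = r - l from by omega,
    show l + 1 * (r - l) = r from by omega]
  simp

theorem pvWinSum_single (C : PySem.Dict Int Int) (T : List Int) (l : Nat) :
    pvWinSum C T l l = C.getD (T.getD l 0) 0 := by
  unfold pvWinSum
  rw [show l + 1 - l = 1 from by omega]
  simp

theorem pvWinSum_congr (C' C : PySem.Dict Int Int) (T : List Int) (l r : Nat)
    (h : ∀ i, l ≤ i → i ≤ r → C'.getD (T.getD i 0) 0 = C.getD (T.getD i 0) 0) :
    pvWinSum C' T l r = pvWinSum C T l r := by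
  unfold pvWinSum
  congr 1
  apply List.map_congr_left
  intro i hi
  rw [List.mem_range'_1] at hi
  exact h i hi.1 (by omega)

theorem pvWinSum_ge (C : PySem.Dict Int Int) (T : List Int) :
    ∀ (n l r : Nat), r = l + n →
      (∀ i, l ≤ i → i ≤ r → 1 ≤ C.getD (T.getD i 0) 0) →
      (n : Int) + 1 ≤ pvWinSum C T l r := by
  intro n
  induction n with
  | zero =>
    intro l r hr h1
    rw [show r = l from by omega, pvWinSum_single]
    simpa using h1 l (le_refl _) (by omega)
  | succ n ih =>
    intro l r hr h1
    rw [pvWinSum_cons C T (by omega : l ≤ r)]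
    have := ih (l + 1) r (by omega) (fun i hi1 hi2 => h1 i (by omega) hi2)
    have := h1 l (le_refl _) (by omega)
    push_cast
    omega

theorem pvWinSum_drop_left (C : PySem.Dict Int Int) (T : List Int) :
    ∀ (k l r : Nat), l + k ≤ r →
      (∀ i, l ≤ i → i < l + k → C.getD (T.getD i 0) 0 = 1) →
      pvWinSum C T l r = pvWinSum C T (l + k) r + k := by
  intro k
  induction k with
  | zero => intro l r _ _; simp
  | succ k ih =>
    intro l r hk h1
    rw [pvWinSum_cons C T (by omega : l ≤ r), h1 l (le_refl _) (by omega),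
      ih (l + 1) r (by omega) (fun i hi1 hi2 => h1 i (by omega) (by omega))]
    rw [show l + 1 + k = l + (k + 1) from by omega]
    push_cast
    ring

theorem pvWinSum_drop_right (C : PySem.Dict Int Int) (T : List Int) :
    ∀ (k l r : Nat), l ≤ r - k → k ≤ r →
      (∀ i, r - k < i → i ≤ r → C.getD (T.getD i 0) 0 = 1) →
      pvWinSum C T l r = pvWinSum C T l (r - k) + k := by
  intro k
  induction k with
  | zero => intro l r _ _ _; simp
  | succ k ih =>
    intro l r hlk hk h1
    rw [pvWinSum_concat C T (by omega : l ≤ r) (by omega : 1 ≤ r),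
      h1 r (by omega) (le_refl _),
      ih l (r - 1) (by omega) (by omega) (fun i hi1 hi2 => h1 i (by omega) (by omega))]
    rw [show r - 1 - k = r - (k + 1) from by omega]
    push_cast
    ring

theorem pv_getD_dec (C : PySem.Dict Int Int) (T : List Int) {l' r' i : Nat}
    (hnd : T.Nodup) (hl : l' < r') (hr : r' < T.length) (hi : i < T.length) :
    ((C.modify (T.getD l' 0) 0 (· - 1)).modify (T.getD r' 0) 0 (· - 1)).getD (T.getD i 0) 0
      = C.getD (T.getD i 0) 0 - (if i = l' then 1 else 0) - (if i = r' then 1 else 0) := by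
  have e1 : (T[i]?.getD 0 = T[r']?.getD 0) ↔ i = r' := pv_getD_inj hnd hi hr
  have e2 : (T[i]?.getD 0 = T[l']?.getD 0) ↔ i = l' := pv_getD_inj hnd hi (by omega)
  have e3 : ¬ (T[r']?.getD 0 = T[l']?.getD 0) :=
    fun hc => absurd ((pv_getD_inj hnd hr (by omega)).mp hc) (by omega)
  rw [PySem.Dict.getD_modify, PySem.Dict.getD_modify, PySem.Dict.getD_modify]
  by_cases h1 : i = r'
  · subst h1
    simp [e3, show ¬ i = l' from by omega]
  · by_cases h2 : i = l'
    · subst h2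
      have ne1 : ¬ (T[i]?.getD 0 = T[r']?.getD 0) := fun hc => h1 (e1.mp hc)
      simp [ne1, h1]
    · have ne1 : ¬ (T[i]?.getD 0 = T[r']?.getD 0) := fun hc => h1 (e1.mp hc)
      have ne2 : ¬ (T[i]?.getD 0 = T[l']?.getD 0) := fun hc => h2 (e2.mp hc)
      simp [ne1, ne2, h1, h2]

theorem pvLoopA_spec : ∀ (fuel : Nat) (C : PySem.Dict Int Int) (T : List Int)
    (left right : Nat) (ans : Int),
    left ≤ right → right < T.length → T.Nodup →
    (∀ i, left ≤ i → i ≤ right → 1 ≤ C.getD (T.getD i 0) 0) →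
    pvWinSum C T left right - ((right : Int) - left + 1) < 2 * fuel →
    pvLoopA fuel C T left right ans
      = ans - (pvWinSum C T left right - ((right : Int) - left + 1))
          - (pvWinSum C T left right - ((right : Int) - left + 1)) % 2 := by
  intro fuel
  induction fuel with
  | zero =>
    intro C T l r ans hlr hrT hnd h1 hf
    exfalso
    have := pvWinSum_ge C T (r - l) l r (by omega) h1
    have hcast : ((r - l : Nat) : Int) = (r : Int) - l := by omega
    rw [hcast] at this
    omega
  | succ fuel ih =>
    intro C T l r ans hlr hrT hnd h1 hf
    simp only [pvLoopA, pvSkipL_collapse, pvSkipR_collapse]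
    set l' := pvSkipL C T r l with hl'def
    set r' := pvSkipR C T l' r with hr'def
    obtain ⟨hsl1, hsl2, hsl3, hsl4⟩ := pvSkipL_spec C T r (r - l) l rfl hlr
    obtain ⟨hsr1, hsr2, hsr3, hsr4⟩ := pvSkipR_spec C T l' r hsl2
    -- skipped entries have count exactly 1
    have hskipL : ∀ i, l ≤ i → i < l' → C.getD (T.getD i 0) 0 = 1 := by
      intro i hi1 hi2
      have := hsl3 i hi1 hi2
      have := h1 i hi1 (by omega)
      omega
    have hskipR : ∀ i, r' < i → i ≤ r → C.getD (T.getD i 0) 0 = 1 := by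
      intro i hi1 hi2
      have := hsr3 i hi1 hi2
      have := h1 i (by omega) hi2
      omega
    -- M is preserved by the two skips
    have hM1 : pvWinSum C T l r = pvWinSum C T l' r + (l' - l : Nat) := by
      have := pvWinSum_drop_left C T (l' - l) l r (by omega)
        (fun i hi1 hi2 => hskipL i hi1 (by omega))
      rw [show l + (l' - l) = l' from by omega] at this
      exact this
    have hM2 : pvWinSum C T l' r = pvWinSum C T l' r' + (r - r' : Nat) := by
      have := pvWinSum_drop_right C T (r - r') l' r (by omega) (by omega)
        (fun i hi1 hi2 => hskipR i (by omega) hi2)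
      rw [show r - (r - r') = r' from by omega] at this
      exact this
    have hMeq : pvWinSum C T l' r' - ((r' : Int) - l' + 1)
        = pvWinSum C T l r - ((r : Int) - l + 1) := by
      have c1 : ((l' - l : Nat) : Int) = (l' : Int) - l := by omega
      have c2 : ((r - r' : Nat) : Int) = (r : Int) - r' := by omega
      rw [hM1, hM2, c1, c2]
      ring
    by_cases hc : l' < r'
    · rw [if_pos hc]
      set C' := (C.modify (T.getD l' 0) 0 (· - 1)).modify (T.getD r' 0) 0 (· - 1) with hC'
      have hdec : ∀ i, i < T.length → C'.getD (T.getD i 0) 0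
          = C.getD (T.getD i 0) 0 - (if i = l' then 1 else 0) - (if i = r' then 1 else 0) :=
        fun i hi => pv_getD_dec C T hnd hc (by omega) hi
      have hcl : 1 < C.getD (T.getD l' 0) 0 := hsl4 (by omega)
      have hcr : 1 < C.getD (T.getD r' 0) 0 := hsr4 hc
      -- new counts stay ≥ 1
      have h1' : ∀ i, l' ≤ i → i ≤ r' → 1 ≤ C'.getD (T.getD i 0) 0 := by
        intro i hi1 hi2
        rw [hdec i (by omega)]
        by_cases e1 : i = l'
        · subst e1; rw [if_pos rfl, if_neg (by omega)]; omega
        · by_cases e2 : i = r'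
          · subst e2; rw [if_neg e1, if_pos rfl]
            omega
          · rw [if_neg e1, if_neg e2]
            have := h1 i (by omega) (by omega)
            omega
      -- new window sum = old - 2
      have hsum : pvWinSum C' T l' r' = pvWinSum C T l' r' - 2 := by
        have hmid : pvWinSum C' T (l' + 1) (r' - 1) = pvWinSum C T (l' + 1) (r' - 1) := by
          apply pvWinSum_congr
          intro i hi1 hi2
          rw [hdec i (by omega), if_neg (by omega), if_neg (by omega)]
          ring
        rw [pvWinSum_cons C' T (by omega : l' ≤ r'), pvWinSum_cons C T (by omega : l' ≤ r'),
          pvWinSum_concat C' T (by omega : l' + 1 ≤ r') (by omega : 1 ≤ r'),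
          pvWinSum_concat C T (by omega : l' + 1 ≤ r') (by omega : 1 ≤ r'),
          hmid, hdec l' (by omega), hdec r' (by omega),
          if_pos rfl, if_neg (by omega : ¬ l' = r'), if_neg (by omega : ¬ r' = l'), if_pos rfl]
        ring
      have hrec := ih C' T l' r' (ans - 2) (by omega) (by omega) hnd h1'
        (by rw [hsum]; omega)
      rw [hrec, hsum]
      omega
    · rw [if_neg hc]
      have heq : l' = r' := by omega
      have hle : 1 ≤ C.getD (T.getD l' 0) 0 := h1 l' (by omega) (by omega)
      have hMval : pvWinSum C T l r - ((r : Int) - l + 1)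
          = C.getD (T.getD l' 0) 0 - 1 := by
        rw [← hMeq, ← heq, pvWinSum_single, heq]
        omega
      rw [hMval, PySem.Int.mod_eq_emod_of_pos (by norm_num : (0 : Int) < 2)]
      by_cases hpar : C.getD (T.getD l' 0) 0 % 2 = 0
      · rw [if_pos (by simpa using hpar)]
        omega
      · rw [if_neg (by simpa using hpar)]
        omega

theorem pv_map_range (T : List Int) (g : Int → Int) :
    (List.range' 0 T.length).map (fun i => g (T.getD i 0)) = T.map g := by
  rw [← List.range_eq_range']
  apply List.ext_getElem
  · simp
  · intro i h1 h2
    simp only [List.getElem_map, List.getElem_range]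
    rw [List.getD_eq_getElem T 0 (by simpa using h2)]

theorem pv_sum_counts (A : List Int) :
    ((PySem.Set.ofList A).map (fun x => ((A.count x : Nat) : Int))).sum = (A.length : Int) := by
  have hperm : (PySem.Set.ofList A).Perm A.dedup := by
    rw [List.perm_ext_iff_of_nodup (PySem.Set.nodup_ofList A) (List.nodup_dedup A)]
    intro a
    rw [PySem.Set.mem_ofList, List.mem_dedup]
  rw [List.Perm.sum_eq (hperm.map _)]
  have : (A.dedup.map (fun x => ((A.count x : Nat) : Int)))
      = (A.dedup.map (fun x => (A.count x : Nat))).map (fun n : Nat => (n : Int)) := by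
    rw [List.map_map]; rfl
  rw [this, ← Nat.cast_list_sum]
  norm_cast
  exact List.sum_map_count_dedup_eq_length A

-- ===== VERDICT (by name: the statement is the Claim_ definition above) =====
theorem solve_spec : Claim_equal_solve := by
  intro A N _ hA
  unfold Spec_solve solve solve_alt
  rw [pvBuildCT_eq]
  simp only
  set T := PySem.List.sorted (PySem.Set.ofList A) (fun x => x) false with hT
  have hperm : T.Perm (PySem.Set.ofList A) := PySem.List.sorted_perm _ _ _
  have hnd : T.Nodup := (hperm.nodup_iff).mpr (PySem.Set.nodup_ofList A)
  have hne : T ≠ [] := by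
    intro h
    rw [hT, PySem.List.sorted_eq_nil_iff] at h
    rcases A with _ | ⟨a, A'⟩
    · exact hA rfl
    · exact List.ne_nil_of_mem ((PySem.Set.mem_ofList _ a).mpr (by simp)) h
  have hlen : 1 ≤ T.length := by
    rcases T with _ | _
    · exact absurd rfl hne
    · simp
  have hmemA : ∀ i, i < T.length → T.getD i 0 ∈ A := by
    intro i hi
    rw [List.getD_eq_getElem T 0 hi]
    exact (PySem.Set.mem_ofList A _).mp (hperm.mem_iff.mp (List.getElem_mem hi))
  have h1 : ∀ i, 0 ≤ i → i ≤ T.length - 1 → 1 ≤ (PySem.Dict.counter A).getD (T.getD i 0) 0 := by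
    intro i _ hi
    rw [PySem.Dict.getD_counter]
    have := List.count_pos_iff.mpr (hmemA i (by omega))
    omega
  have hsum : pvWinSum (PySem.Dict.counter A) T 0 (T.length - 1) = (A.length : Int) := by
    unfold pvWinSum
    rw [show T.length - 1 + 1 - 0 = T.length from by omega]
    have : ((List.range' 0 T.length).map (fun i => (PySem.Dict.counter A).getD (T.getD i 0) 0))
        = (List.range' 0 T.length).map (fun i => ((A.count (T.getD i 0) : Nat) : Int)) := by
      apply List.map_congr_left
      intro i _
      rw [PySem.Dict.getD_counter]
    rw [this, pv_map_range T (fun x => ((A.count x : Nat) : Int)),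
      List.Perm.sum_eq (hperm.map _), pv_sum_counts A]
  have hKlen : (PySem.Set.ofList A).length = T.length := hperm.length_eq.symm
  have hloop := pvLoopA_spec (A.length + 1) (PySem.Dict.counter A) T 0 (T.length - 1) N
    (by omega) (by omega) hnd h1
    (by rw [hsum]; have : ((T.length - 1 : Nat) : Int) = (T.length : Int) - 1 := by omega
        rw [this]; push_cast; omega)
  rw [hloop, hsum, hKlen,
    PySem.Int.mod_eq_emod_of_pos (by norm_num : (0 : Int) < 2)]
  have hc : ((T.length - 1 : Nat) : Int) = (T.length : Int) - 1 := by omega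
  rw [hc]
  ring_nf
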